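-- pv_equiv track=rewrite | github.com/ImperialCollegeLondon/FYP-Project--Post-Quantum-Encryption | Code/ntru.py | bytes_to_ternary
-- ===== SOURCE A (Python) =====
-- def bytes_to_ternary(byte_array):
--
--     """
--     Name:        bytes_to_ternary
--
--     Description: Converts byte array to ternary array
--
--     Arguments:   - byte_array: Array of bytes, where elements in array in [0,255]
--
--     Returns:     - ternary_array: Array of trits, where elements in array are -1, 0 or 1
--     """
--
--
--     if max(byte_array) > 255:
--         raise ValueError("Max Byte val: ", max(byte_array), " not in valid range")
--
--     elif min(byte_array) < 0:
--         raise ValueError("Min Byte val: ", min(byte_array), " not in valid range")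
--
--     ternary_array = []
--     for byte in byte_array:
--         for j in range(5,-1,-1):
--             if byte >= 2 * 3**j:
--                 ternary_array.append(1)
--                 byte -= 2 * 3**j
--             elif 3**j <= byte <= 2*3**j:
--                 ternary_array.append(0)
--                 byte -= 3**j
--             else:
--                 ternary_array.append(-1)
--
--     return ternary_array
-- ===== SOURCE B (Python) =====
-- def bytes_to_ternary(byte_array):
--     if max(byte_array) > 255:
--         raise ValueError("Max Byte val: ", max(byte_array), " not in valid range")
--     elif min(byte_array) < 0:
--         raise ValueError("Min Byte val: ", min(byte_array), " not in valid range")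
--     ternary_array = []
--     for byte in byte_array:
--         trits = []
--         for _ in range(6):
--             trits.append(byte % 3 - 1)
--             byte //= 3
--         ternary_array.extend(reversed(trits))
--     return ternary_array
-- ===== Notes on version B (the rewrite author's own statement) =====
-- stated objective: simpler
-- what changed: Per byte, the six trits are produced least-significant-first by the branch-free arithmetic d = byte % 3 - 1; byte //= 3 and then reversed, instead of A's descending-power compare-and-subtract ladder with three branches per digit.
import Mathlib
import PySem

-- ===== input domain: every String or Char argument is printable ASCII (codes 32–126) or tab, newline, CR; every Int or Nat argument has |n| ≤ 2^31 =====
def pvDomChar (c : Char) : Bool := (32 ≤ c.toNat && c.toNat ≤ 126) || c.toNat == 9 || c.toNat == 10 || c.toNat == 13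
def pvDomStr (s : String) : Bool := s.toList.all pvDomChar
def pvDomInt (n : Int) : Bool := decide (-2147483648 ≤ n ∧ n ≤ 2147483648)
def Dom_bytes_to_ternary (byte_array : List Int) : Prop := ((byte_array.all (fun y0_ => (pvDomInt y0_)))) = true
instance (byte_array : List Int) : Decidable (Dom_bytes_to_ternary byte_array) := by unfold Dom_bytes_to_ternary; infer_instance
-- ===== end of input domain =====

-- B replaces A's descending-power compare-and-subtract ladder by a branch-free
-- '% 3 / //= 3' digit loop plus a reverse; objective: simpler, same cost.


-- ===== PORT A =====
-- inner loop body of A: for j in range(5,-1,-1) with state (ternary_array, byte);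
-- 3**j is ported as 3 ^ j.toNat (exact: every j produced by range(5,-1,-1) is ≥ 0)
def pvStepA (st : List Int × Int) (j : Int) : List Int × Int :=
  if st.2 ≥ 2 * 3 ^ j.toNat then (st.1 ++ [1], st.2 - 2 * 3 ^ j.toNat)
  else if 3 ^ j.toNat ≤ st.2 ∧ st.2 ≤ 2 * 3 ^ j.toNat then (st.1 ++ [0], st.2 - 3 ^ j.toNat)
  else (st.1 ++ [-1], st.2)

def bytes_to_ternary (byte_array : List Int) : List Int :=
  match PySem.List.max? byte_array (fun y => y), PySem.List.min? byte_array (fun y => y) with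
  | some mx, some mn =>
      if mx > 255 then []      -- Python raises ValueError here; excluded by Pre_
      else if mn < 0 then []   -- Python raises ValueError here; excluded by Pre_
      else byte_array.foldl
        (fun acc byte => ((PySem.List.pyRange 5 (-1) (-1)).foldl pvStepA (acc, byte)).1) []
  | _, _ => []                 -- max()/min() on an empty list raise; excluded by Pre_

-- ===== PORT B =====
-- inner loop body of B: for _ in range(6) with state (trits, byte)
def pvStepB (st : List Int × Int) (_j : Int) : List Int × Int :=
  (st.1 ++ [PySem.Int.mod st.2 3 - 1], PySem.Int.floordiv st.2 3)

def bytes_to_ternary_alt (byte_array : List Int) : List Int :=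
  match PySem.List.max? byte_array (fun y => y) with
  | none => []                 -- max() on an empty list raises; excluded by Pre_
  | some mx =>
    match PySem.List.min? byte_array (fun y => y) with
    | none => []               -- min() on an empty list raises; excluded by Pre_
    | some mn =>
      if mx > 255 then []      -- Python raises ValueError here; excluded by Pre_
      else if mn < 0 then []   -- Python raises ValueError here; excluded by Pre_
      else byte_array.foldl
        (fun acc byte =>
          acc ++ ((PySem.List.pyRange 0 6 1).foldl pvStepB ([], byte)).1.reverse) []

-- ===== PRECONDITION & SPEC =====
-- Pre_ excludes exactly the inputs on which A raises ValueError: the empty list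
-- (max() of an empty sequence) and lists with an element below 0 or above 255.
def Pre_bytes_to_ternary (byte_array : List Int) : Prop :=
  byte_array ≠ [] ∧ ∀ x ∈ byte_array, 0 ≤ x ∧ x ≤ 255
instance (byte_array : List Int) : Decidable (Pre_bytes_to_ternary byte_array) := by
  unfold Pre_bytes_to_ternary; infer_instance

def pvWitness_bytes_to_ternary : List Int := [0, 7, 255]

def Spec_bytes_to_ternary (byte_array : List Int) (out : List Int) : Prop :=
  out = bytes_to_ternary_alt byte_array
instance (byte_array : List Int) (out : List Int) : Decidable (Spec_bytes_to_ternary byte_array out) := by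
  unfold Spec_bytes_to_ternary; infer_instance

-- ===== CLAIM (what is proved, stated in full; the proofs are below) =====
def Claim_equal_bytes_to_ternary : Prop := ∀ (byte_array : List Int), Dom_bytes_to_ternary byte_array → Pre_bytes_to_ternary byte_array → Spec_bytes_to_ternary byte_array (bytes_to_ternary byte_array)

-- ===== LEMMAS AND PROOFS =====

-- the inner loops only append to their accumulator component
theorem pvStepA_acc (l : List Int) (acc : List Int) (b : Int) :
    l.foldl pvStepA (acc, b) =
      (acc ++ (l.foldl pvStepA ([], b)).1, (l.foldl pvStepA ([], b)).2) := by
  induction l generalizing acc b with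
  | nil => simp
  | cons j t ih =>
    simp only [List.foldl_cons]
    rw [ih, ih (pvStepA ([], b) j).1]
    simp [pvStepA]
    split_ifs <;> simp

-- the two six-trit encoders agree on 0..255 (finite check)
set_option maxRecDepth 20000 in
theorem pvTrits_eq_nat : ∀ n : Fin 256,
    ((PySem.List.pyRange 5 (-1) (-1)).foldl pvStepA ([], (n.val : Int))).1 =
      ((PySem.List.pyRange 0 6 1).foldl pvStepB ([], (n.val : Int))).1.reverse := by
  decide

theorem pvTrits_eq (b : Int) (h0 : 0 ≤ b) (h1 : b ≤ 255) :
    ((PySem.List.pyRange 5 (-1) (-1)).foldl pvStepA ([], b)).1 =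
      ((PySem.List.pyRange 0 6 1).foldl pvStepB ([], b)).1.reverse := by
  lift b to Nat using h0 with n
  have hn : n < 256 := by omega
  exact pvTrits_eq_nat ⟨n, hn⟩

-- the outer loops agree elementwise given the per-byte lemma
theorem pvOuter_eq (xs : List Int) (hx : ∀ x ∈ xs, 0 ≤ x ∧ x ≤ 255) :
    xs.foldl (fun acc byte => ((PySem.List.pyRange 5 (-1) (-1)).foldl pvStepA (acc, byte)).1) [] =
      xs.foldl (fun acc byte => acc ++ ((PySem.List.pyRange 0 6 1).foldl pvStepB ([], byte)).1.reverse) [] := by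
  have key : ∀ (acc : List Int), ∀ t : List Int, (∀ x ∈ t, 0 ≤ x ∧ x ≤ 255) →
      t.foldl (fun acc byte => ((PySem.List.pyRange 5 (-1) (-1)).foldl pvStepA (acc, byte)).1) acc =
      t.foldl (fun acc byte => acc ++ ((PySem.List.pyRange 0 6 1).foldl pvStepB ([], byte)).1.reverse) acc := by
    intro acc t
    induction t generalizing acc with
    | nil => intro _; rfl
    | cons b t ih =>
      intro h
      simp only [List.foldl_cons]
      rw [pvStepA_acc, pvTrits_eq b (h b (by simp)).1 (h b (by simp)).2]
      exact ih _ (fun x hx => h x (by simp [hx]))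
  exact key [] xs hx

-- ===== VERDICT (by name: the statement is the Claim_ definition above) =====
theorem bytes_to_ternary_spec : Claim_equal_bytes_to_ternary := by
  intro xs _ hpre
  obtain ⟨hne, hbd⟩ := hpre
  unfold Spec_bytes_to_ternary bytes_to_ternary bytes_to_ternary_alt
  cases hmx : PySem.List.max? xs (fun y => y) with
  | none => exact absurd (((PySem.List.max?_eq_none_iff _ _).1 hmx)) hne
  | some mx =>
    cases hmn : PySem.List.min? xs (fun y => y) with
    | none => exact absurd (((PySem.List.min?_eq_none_iff _ _).1 hmn)) hne
    | some mn =>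
      have h1 : ¬ mx > 255 := by
        have := (hbd mx (PySem.List.max?_mem hmx)).2; omega
      have h2 : ¬ mn < 0 := by
        have := (hbd mn (PySem.List.min?_mem hmn)).1; omega
      simp only [h1, h2, if_false]
      exact pvOuter_eq xs hbd
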